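-- pv_equiv track=rewrite | github.com/timersdowm/LinkAlign | GenerateSchemas.py | transform_name
-- ===== SOURCE A (Python) =====
-- def transform_name(table_name, col_name):
--     prefix = rf"{table_name}_{col_name}"
--     prefix = prefix if len(prefix) < 100 else prefix[:100]
--
--     syn_lis = ["(", ")", "%", "/"]
--     for syn in syn_lis:
--         if syn in prefix:
--             prefix = prefix.replace(syn, "_")
--
--     return prefix
-- ===== SOURCE B (Python) =====
-- def transform_name(table_name, col_name):
--     prefix = f"{table_name}_{col_name}"[:100]
--     return "".join("_" if ch in "()%/" else ch for ch in prefix)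
-- ===== Notes on version B (the rewrite author's own statement) =====
-- stated objective: simpler
-- what changed: Replaces the conditional loop of four guarded full-string replace passes with a single character-wise pass that classifies each character of the truncated prefix locally and joins the result.
import Mathlib
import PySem

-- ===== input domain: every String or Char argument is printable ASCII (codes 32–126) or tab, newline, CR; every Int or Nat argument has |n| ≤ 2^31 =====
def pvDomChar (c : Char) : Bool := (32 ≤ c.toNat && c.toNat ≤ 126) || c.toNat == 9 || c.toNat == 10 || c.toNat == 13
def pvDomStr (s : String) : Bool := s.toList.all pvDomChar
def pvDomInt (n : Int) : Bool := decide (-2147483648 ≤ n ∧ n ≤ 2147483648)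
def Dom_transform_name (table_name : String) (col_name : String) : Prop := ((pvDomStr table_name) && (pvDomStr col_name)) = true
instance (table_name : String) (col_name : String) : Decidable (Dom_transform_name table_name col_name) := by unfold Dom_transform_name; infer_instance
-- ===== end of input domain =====

-- B replaces A's four guarded replace passes by one character-wise classifying pass over the truncated prefix.


-- ===== PORT A =====
def transform_name (table_name : String) (col_name : String) : String :=
  let prefix0 : List Char := table_name.toList ++ '_' :: col_name.toList
  let prefix1 : List Char :=
    if prefix0.length < 100 then prefix0 else PySem.List.slice prefix0 none (some 100)
  let synLis : List (List Char) := [['('], [')'], ['%'], ['/']]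
  let prefix2 : List Char :=
    synLis.foldl (fun p syn => if PySem.Chars.isIn syn p then PySem.Chars.replace p syn ['_'] else p) prefix1
  String.ofList prefix2

-- ===== PORT B =====
def transform_name_alt (table_name : String) (col_name : String) : String :=
  let pre : List Char := PySem.List.slice (table_name.toList ++ '_' :: col_name.toList) none (some 100)
  String.ofList (pre.map (fun ch => if ch ∈ ['(', ')', '%', '/'] then '_' else ch))

-- ===== PRECONDITION & SPEC =====
def Spec_transform_name (table_name : String) (col_name : String) (out : String) : Prop := out = transform_name_alt table_name col_name
instance (table_name : String) (col_name : String) (out : String) : Decidable (Spec_transform_name table_name col_name out) := by unfold Spec_transform_name; infer_instance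

-- ===== CLAIM (what is proved, stated in full; the proofs are below) =====
def Claim_equal_transform_name : Prop := ∀ (table_name : String) (col_name : String), Dom_transform_name table_name col_name → Spec_transform_name table_name col_name (transform_name table_name col_name)

-- ===== LEMMAS AND PROOFS =====

-- replacing a single character by '_' acts pointwise (inner loop of Chars.replace)
lemma repl_go_single (c : Char) : ∀ (fuel : Nat) (l acc : List Char), l.length ≤ fuel →
    PySem.Chars.replace.go [c] ['_'] fuel l acc
      = acc.reverse ++ l.map (fun ch => if ch = c then '_' else ch) := by
  intro fuel
  induction fuel with
  | zero =>
    intro l acc h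
    have : l = [] := List.length_eq_zero_iff.mp (Nat.le_zero.mp h)
    subst this
    simp [PySem.Chars.replace.go]
  | succ n ih =>
    intro l acc h
    cases l with
    | nil => simp [PySem.Chars.replace.go]
    | cons c' t =>
      simp only [PySem.Chars.replace.go, List.isPrefixOf, Bool.and_true]
      by_cases hc : c = c'
      · subst hc
        simp only [beq_self_eq_true, if_pos]
        rw [ih _ _ (by simpa using h)]
        simp
      · rw [if_neg (by simpa using fun hcc : c = c' => hc hcc)]
        rw [ih _ _ (by simpa using h)]
        simp [Ne.symm hc]

lemma replace_single (c : Char) (s : List Char) :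
    PySem.Chars.replace s [c] ['_'] = s.map (fun ch => if ch = c then '_' else ch) := by
  simpa [PySem.Chars.replace] using repl_go_single c s.length s [] le_rfl

-- one guarded pass of A's loop is exactly a pointwise map, whether or not the guard fires
lemma step_eq_map (c : Char) (p : List Char) :
    (if PySem.Chars.isIn [c] p then PySem.Chars.replace p [c] ['_'] else p)
      = p.map (fun ch => if ch = c then '_' else ch) := by
  by_cases h : PySem.Chars.isIn [c] p = true
  · rw [if_pos h, replace_single]
  · rw [if_neg h]
    have hnot : c ∉ p := by
      intro hmem
      exact (PySem.Chars.isIn_eq_false_iff (sub := [c]) (s := p)).mp (by simpa using h)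
        ((List.singleton_infix_iff c p).mpr hmem)
    symm
    rw [List.map_congr_left (g := id) (fun ch hch => by
      have : ch ≠ c := fun hc => hnot (hc ▸ hch)
      simp [this]), List.map_id]

theorem transform_name_spec_aux (table_name col_name : String) :
    transform_name table_name col_name = transform_name_alt table_name col_name := by
  unfold transform_name transform_name_alt
  set s : List Char := table_name.toList ++ '_' :: col_name.toList with hs
  -- the truncation: A's conditional equals B's unconditional slice
  have htr : (if s.length < 100 then s else PySem.List.slice s none (some 100))
      = PySem.List.slice s none (some 100) := by
    split_ifs with h
    · have h100 : PySem.List.slice s none (some (100 : Int)) = s.take (100 : Int).toNat :=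
        PySem.List.slice_to s (by norm_num)
      rw [h100]
      exact (List.take_of_length_le (by omega)).symm
    · rfl
  simp only [htr]
  set p : List Char := PySem.List.slice s none (some 100)
  -- the four passes collapse to one map
  simp only [List.foldl_cons, List.foldl_nil, step_eq_map, List.map_map]
  congr 1
  apply List.map_congr_left
  intro ch _
  by_cases h1 : ch = '(' <;> by_cases h2 : ch = ')' <;> by_cases h3 : ch = '%' <;>
    by_cases h4 : ch = '/' <;> simp_all [Function.comp]

-- ===== VERDICT (by name: the statement is the Claim_ definition above) =====
theorem transform_name_spec : Claim_equal_transform_name := by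
  intro table_name col_name _
  exact transform_name_spec_aux table_name col_name
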